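-- pv_equiv track=rewrite | github.com/HyungJunGoo/AlgorithmProblems | Baekjun/DFS/RGB_street.py | dfs
-- ===== SOURCE A (Python) =====
-- def dfs(home, index, cost, former_colour):
--     if index == len(home):
--         return cost
--     m = 1001
--     next_colour = 0
--     for i in range(3):
--         if i == former_colour: continue
--         else:
--             if m > home[index][i]:
--                 m = home[index][i]
--                 next_colour = i
--     return dfs(home, index+1, cost+m, next_colour)
-- ===== SOURCE B (Python) =====
-- def dfs(home, index, cost, former_colour):
--     # Iterative while-loop with explicit state instead of recursion; same
--     # 1001 sentinel, strict '>' lowest-index tie-break and skip rule.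
--     prev = former_colour
--     while index != len(home):
--         row = home[index]
--         m, c = 1001, 0
--         for i in (0, 1, 2):
--             if i != prev and m > row[i]:
--                 m, c = row[i], i
--         cost += m
--         prev = c
--         index += 1
--     return cost
-- ===== Notes on version B (the rewrite author's own statement) =====
-- stated objective: simpler
-- what changed: Replaces A's tail recursion threading (index, cost, colour) through call frames by one iterative while-loop that maintains (cost, previous colour) as local state, with the per-row minimum scan factored out.
-- outside the precondition, e.g. on dfs([[1, 2]], 0, 0, 2): A returns 1, B returns 1
import Mathlib
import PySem

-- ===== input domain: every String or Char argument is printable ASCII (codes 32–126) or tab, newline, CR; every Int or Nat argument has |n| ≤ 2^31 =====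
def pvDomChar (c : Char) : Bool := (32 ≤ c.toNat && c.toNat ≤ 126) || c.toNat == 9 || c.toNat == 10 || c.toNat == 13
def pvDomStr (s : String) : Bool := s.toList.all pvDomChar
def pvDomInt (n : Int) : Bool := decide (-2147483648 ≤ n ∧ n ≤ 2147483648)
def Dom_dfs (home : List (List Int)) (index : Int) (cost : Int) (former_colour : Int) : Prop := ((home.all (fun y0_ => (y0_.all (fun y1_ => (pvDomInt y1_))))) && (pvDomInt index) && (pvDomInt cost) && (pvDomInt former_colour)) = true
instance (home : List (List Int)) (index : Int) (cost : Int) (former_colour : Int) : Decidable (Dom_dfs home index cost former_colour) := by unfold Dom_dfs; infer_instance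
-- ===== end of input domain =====

-- B rewrites A's tail recursion as one iterative loop over the house positions; objective: simpler.

-- ===== PORT A =====
-- The Nat argument is fuel that only makes A's recursion total; inside Pre_ it never runs out.
def dfsFuel : Nat → List (List Int) → Int → Int → Int → Int
  | 0, _, _, cost, _ => cost
  | Nat.succ n, home, index, cost, former_colour =>
      if index = (home.length : Int) then cost
      else
        let row := (PySem.List.pyGet? home index).getD []
        let r := (PySem.List.pyRange 0 3 1).foldl
          (fun (p : Int × Int) (i : Int) =>
            if i = former_colour then p
            else if p.1 > (PySem.List.pyGet? row i).getD 0 then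
              ((PySem.List.pyGet? row i).getD 0, i)
            else p) (1001, 0)
        dfsFuel n home (index + 1) (cost + r.1) r.2

def dfs (home : List (List Int)) (index : Int) (cost : Int) (former_colour : Int) : Int :=
  dfsFuel (2 * home.length + 1) home index cost former_colour

-- ===== PORT B =====
def rowMin (row : List Int) (prev : Int) : Int × Int :=
  [(0 : Int), 1, 2].foldl
    (fun (p : Int × Int) (i : Int) =>
      if i ≠ prev ∧ p.1 > (PySem.List.pyGet? row i).getD 0 then
        ((PySem.List.pyGet? row i).getD 0, i)
      else p) (1001, 0)

-- The fuel only makes B's while-loop total; inside Pre_ it never runs out.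
def dfsLoop (home : List (List Int)) : Nat → Int → Int × Int → Int × Int
  | 0, _, s => s
  | Nat.succ n, j, s =>
      if j = (home.length : Int) then s
      else
        let row := (PySem.List.pyGet? home j).getD []
        let mc := rowMin row s.2
        dfsLoop home n (j + 1) (s.1 + mc.1, mc.2)

def dfs_alt (home : List (List Int)) (index : Int) (cost : Int) (former_colour : Int) : Int :=
  (dfsLoop home (2 * home.length + 1) index (cost, former_colour)).1

-- ===== PRECONDITION & SPEC =====
-- Pre_ excludes index beyond ±len(home), where Python A raises (RecursionError / IndexError),
-- and visited rows shorter than 3 entries, where A raises IndexError except in the corner where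
-- former_colour masks the one missing entry (see the cite).
def Pre_dfs (home : List (List Int)) (index : Int) (cost : Int) (former_colour : Int) : Prop :=
  -(home.length : Int) ≤ index ∧ index ≤ (home.length : Int) ∧
    ∀ row ∈ home.drop index.toNat, 3 ≤ row.length
instance (home : List (List Int)) (index : Int) (cost : Int) (former_colour : Int) : Decidable (Pre_dfs home index cost former_colour) := by unfold Pre_dfs; infer_instance

def pvWitness_dfs : List (List Int) × Int × Int × Int := ([[1, 2, 3], [3, 2, 1]], 0, 0, 3)

def Spec_dfs (home : List (List Int)) (index : Int) (cost : Int) (former_colour : Int) (out : Int) : Prop := out = dfs_alt home index cost former_colour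
instance (home : List (List Int)) (index : Int) (cost : Int) (former_colour : Int) (out : Int) : Decidable (Spec_dfs home index cost former_colour out) := by unfold Spec_dfs; infer_instance

-- ===== CLAIM (what is proved, stated in full; the proofs are below) =====
def Claim_equal_dfs : Prop := ∀ (home : List (List Int)) (index : Int) (cost : Int) (former_colour : Int), Dom_dfs home index cost former_colour → Pre_dfs home index cost former_colour → Spec_dfs home index cost former_colour (dfs home index cost former_colour)

-- ===== LEMMAS AND PROOFS =====

-- A's inner range(3) scan computes exactly B's rowMin.
lemma inner_eq (row : List Int) (prev : Int) :
    (PySem.List.pyRange 0 3 1).foldl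
      (fun (p : Int × Int) (i : Int) =>
        if i = prev then p
        else if p.1 > (PySem.List.pyGet? row i).getD 0 then
          ((PySem.List.pyGet? row i).getD 0, i)
        else p) (1001, 0) = rowMin row prev := by
  have hr : PySem.List.pyRange 0 3 1 = [(0 : Int), 1, 2] := by decide
  rw [hr, rowMin]
  apply List.foldl_ext
  intro p i _
  by_cases h : i = prev
  · simp [h]
  · by_cases h2 : p.1 > (PySem.List.pyGet? row i).getD 0 <;> simp [h, h2]

-- Step for step, A's fueled recursion and B's fueled while-loop compute the same state.
lemma dfsFuel_eq (n : Nat) : ∀ (home : List (List Int)) (index cost former : Int),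
    dfsFuel n home index cost former = (dfsLoop home n index (cost, former)).1 := by
  induction n with
  | zero =>
      intro home index cost former
      simp [dfsFuel, dfsLoop]
  | succ n ih =>
      intro home index cost former
      by_cases hj : index = (home.length : Int)
      · simp [dfsFuel, hj, dfsLoop]
      · rw [dfsFuel, dfsLoop]
        simp only [hj, if_false]
        rw [inner_eq, ih]

-- ===== VERDICT (by name: the statement is the Claim_ definition above) =====
theorem dfs_spec : Claim_equal_dfs := by
  intro home index cost former _ _
  unfold Spec_dfs dfs dfs_alt
  exact dfsFuel_eq (2 * home.length + 1) home index cost former
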